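-- pv_equiv track=rewrite | github.com/radoslawrolka/Graph_Algorithms | lab1/sol2_DFSBFS.py | maxmin_edgeval_DFS
-- ===== SOURCE A (Python) =====
-- from collections import deque
--
-- def toNeighbour(V, E):
--     graph = [[] for _ in range(V)]
--     for (x, y, c) in E:
--         graph[x-1].append(y-1)
--         graph[y-1].append(x-1)
--     return graph
--
-- def DFS_array(V, graph):
--     visited = [False for _ in range(V)]
--     visited[0] = True
--
--     que = deque()
--     que.append(0)
--
--     while que:
--         vertex = que.pop()
--         if vertex == 1:
--             return True
--         for neighbour in graph[vertex]:
--             if not visited[neighbour]: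
--                 visited[neighbour] = True
--                 que.append(neighbour)
--     return visited[1]
--
-- def maxmin_edgeval_DFS(V, E):
--     left = 0
--     right = len(E) - 1
--     E.sort(key=lambda x: x[2])
--     saved = 0
--     while left <= right:
--         mid = (left + right) // 2
--         if DFS_array(V, toNeighbour(V, E[mid:])):
--             saved = E[mid][2]
--             left = mid + 1
--         else:
--             right = mid -1
--
--     return saved
-- ===== SOURCE B (Python) =====
-- def maxmin_edgeval_DFS(V, E):
--     E.sort(key=lambda x: x[2])
--     comp = list(range(V))
--     for (x, y, c) in reversed(E):
--         a, b = comp[x-1], comp[y-1]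
--         if a != b:
--             comp = [a if t == b else t for t in comp]
--         if comp[0] == comp[1]:
--             return c
--     return 0
-- ===== Notes on version B (the rewrite author's own statement) =====
-- stated objective: alternative
-- what changed: Replaces the binary search over weight thresholds, whose every probe rebuilds an adjacency list and runs a DFS, by a single descending sweep of the sorted edge list that merges components in a label array (Kruskal-style) and returns the weight of the first edge connecting vertices 0 and 1.
-- outside the precondition, e.g. on maxmin_edgeval_DFS(6, [(-4, -1, -1), (-1, -5, 2), (-9, 4, -2), (3, 3, 3)]): A returns -1, B returns -1
import Mathlib
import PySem

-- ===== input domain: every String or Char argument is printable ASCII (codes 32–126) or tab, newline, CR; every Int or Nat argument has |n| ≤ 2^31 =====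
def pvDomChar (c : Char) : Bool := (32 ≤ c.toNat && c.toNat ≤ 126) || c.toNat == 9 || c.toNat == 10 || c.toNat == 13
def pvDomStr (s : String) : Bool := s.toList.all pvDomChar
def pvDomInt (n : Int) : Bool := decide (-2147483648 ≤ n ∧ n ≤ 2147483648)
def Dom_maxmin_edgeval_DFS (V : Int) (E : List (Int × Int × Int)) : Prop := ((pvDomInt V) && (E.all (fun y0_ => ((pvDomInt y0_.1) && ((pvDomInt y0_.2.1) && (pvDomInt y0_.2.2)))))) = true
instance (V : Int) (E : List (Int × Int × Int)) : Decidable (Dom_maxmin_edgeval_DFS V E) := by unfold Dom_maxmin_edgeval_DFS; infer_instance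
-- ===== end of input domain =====

-- B replaces A's binary search over weight thresholds (each probe rebuilding an adjacency list and
-- running a DFS) by one descending sweep of the sorted edges with a component-label array
-- (Kruskal-style); objective: alternative. Both A and B sort E ascending in place (the same
-- observable mutation); the equivalence proved here is about the return value.

-- ===== PORT A =====

-- toNeighbour: graph = [[] for _ in range(V)]; for (x,y,c) in E: graph[x-1].append(y-1); graph[y-1].append(x-1)
def toNeighbour (V : Int) (E : List (Int × Int × Int)) : List (List Int) :=
  let graph : List (List Int) := (PySem.List.pyRange 0 V 1).map (fun _ => ([] : List Int))
  E.foldl (fun g e =>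
    let g1 := match PySem.List.pyGet? g (e.1 - 1) with
      | some l => PySem.List.pySetD g (e.1 - 1) (l ++ [e.2.1 - 1])
      | none => g          -- Python raises IndexError here (excluded by Pre_)
    match PySem.List.pyGet? g1 (e.2.1 - 1) with
      | some l => PySem.List.pySetD g1 (e.2.1 - 1) (l ++ [e.1 - 1])
      | none => g1) graph  -- Python raises IndexError here (excluded by Pre_)

-- index normalisation of a Python list index (used by the termination lemmas below and the proofs)
def normk (n : Nat) (i : Int) : Nat := if 0 ≤ i then i.toNat else n - (-i).toNat

theorem pyIdx?_eq_norm (n : Nat) (i : Int) (h1 : -(n:Int) ≤ i) (h2 : i < (n:Int)) :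
    PySem.List.pyIdx? n i = some (normk n i) := by
  unfold PySem.List.pyIdx? normk
  split_ifs <;> first | rfl | omega

theorem normk_lt (n : Nat) (i : Int) (h1 : -(n:Int) ≤ i) (h2 : i < (n:Int)) : normk n i < n := by
  unfold normk; split_ifs <;> omega

theorem pyGet?_eq_getElem?_norm {α : Type} (l : List α) (i : Int)
    (h1 : -(l.length:Int) ≤ i) (h2 : i < (l.length:Int)) :
    PySem.List.pyGet? l i = l[normk l.length i]? := by
  simp [PySem.List.pyGet?, pyIdx?_eq_norm _ _ h1 h2]

theorem pySetD_eq_set_norm {α : Type} (l : List α) (i : Int) (v : α)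
    (h1 : -(l.length:Int) ≤ i) (h2 : i < (l.length:Int)) :
    PySem.List.pySetD l i v = l.set (normk l.length i) v := by
  simp [PySem.List.pySetD, PySem.List.pySet?, pyIdx?_eq_norm _ _ h1 h2]

theorem InRange_of_pyGet?_some {α : Type} {l : List α} {i : Int} {v : α}
    (h : PySem.List.pyGet? l i = some v) : -(l.length:Int) ≤ i ∧ i < (l.length:Int) := by
  by_contra hc
  rw [(PySem.List.pyGet?_eq_none_iff l i).2 (by exact hc)] at h
  cases h

-- one body of the inner 'for neighbour in graph[vertex]' loop
def dfsStep (vq : List Bool × List Int) (nb : Int) : List Bool × List Int :=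
  match PySem.List.pyGet? vq.1 nb with
  | some false => (PySem.List.pySetD vq.1 nb true, vq.2 ++ [nb])
  | _ => vq    -- already visited (none = Python IndexError, excluded by Pre_)

def dfsMeasure (vq : List Bool × List Int) : Nat := 2 * vq.1.count false + vq.2.length

theorem dfsStep_measure (vq : List Bool × List Int) (nb : Int) :
    dfsMeasure (dfsStep vq nb) ≤ dfsMeasure vq := by
  unfold dfsStep
  split
  · next heq =>
    obtain ⟨hr1, hr2⟩ := InRange_of_pyGet?_some heq
    rw [pyGet?_eq_getElem?_norm _ _ hr1 hr2] at heq
    have hk : normk vq.1.length nb < vq.1.length := normk_lt _ _ hr1 hr2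
    have hval : vq.1[normk vq.1.length nb] = false := by
      rw [List.getElem?_eq_getElem hk] at heq; exact Option.some.inj heq
    rw [pySetD_eq_set_norm _ _ _ hr1 hr2]
    have hcount := List.count_set (a := true) (b := false) (l := vq.1)
      (i := normk vq.1.length nb) hk
    simp [hval] at hcount
    have hpos : 0 < vq.1.count false :=
      List.count_pos_iff.2 (by rw [← hval]; exact List.getElem_mem hk)
    simp [dfsMeasure, hcount]
    omega
  · exact le_refl _

theorem dfsFold_measure (nbrs : List Int) (vq : List Bool × List Int) :
    dfsMeasure (nbrs.foldl dfsStep vq) ≤ dfsMeasure vq := by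
  induction nbrs generalizing vq with
  | nil => simp
  | cons n ns ih => exact le_trans (ih (dfsStep vq n)) (dfsStep_measure vq n)

-- the 'while que:' loop of DFS_array (deque.pop pops from the right)
def dfsLoop (graph : List (List Int)) (vq : List Bool × List Int) : Bool :=
  match hq : vq.2 with
  | [] => (PySem.List.pyGet? vq.1 1).getD false   -- return visited[1] (none = IndexError, excluded by Pre_)
  | q :: qs =>
    let vertex := (q :: qs).getLast (by simp)
    if vertex == 1 then true
    else
      let nbrs := (PySem.List.pyGet? graph vertex).getD []   -- graph[vertex] (none = IndexError, excluded by Pre_)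
      dfsLoop graph (nbrs.foldl dfsStep (vq.1, (q :: qs).dropLast))
termination_by dfsMeasure vq
decreasing_by
  refine lt_of_le_of_lt (dfsFold_measure _ _) ?_
  simp only [dfsMeasure, List.length_dropLast, List.length_cons, hq]
  omega

def DFS_array (V : Int) (graph : List (List Int)) : Bool :=
  let visited : List Bool := (PySem.List.pyRange 0 V 1).map (fun _ => false)
  match PySem.List.pySet? visited 0 true with   -- visited[0] = True (none = IndexError, excluded by Pre_)
  | none => false
  | some visited' => dfsLoop graph (visited', [0])

-- the 'while left <= right:' binary-search loop
def bsLoop (V : Int) (S : List (Int × Int × Int)) (left right saved : Int) : Int :=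
  if _h : left ≤ right then
    let mid := PySem.Int.floordiv (left + right) 2
    if DFS_array V (toNeighbour V (PySem.List.slice S (some mid) none)) then
      let saved' := match PySem.List.pyGet? S mid with
        | some e => e.2.2
        | none => saved  -- Python IndexError (unreachable: 0 ≤ left ≤ mid ≤ right < len S)
      bsLoop V S (mid + 1) right saved'
    else
      bsLoop V S left (mid - 1) saved
  else saved
termination_by (right - left + 1).toNat
decreasing_by
  · have h := PySem.Int.floordiv_two_mid_bounds _h
    omega
  · have h := PySem.Int.floordiv_two_mid_bounds _h
    omega

def maxmin_edgeval_DFS (V : Int) (E : List (Int × Int × Int)) : Int :=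
  let left : Int := 0
  let right : Int := (E.length : Int) - 1
  let S := PySem.List.sorted E (fun x => x.2.2) false   -- E.sort(key=lambda x: x[2])
  bsLoop V S left right 0

-- ===== PORT B =====

-- the 'for (x, y, c) in reversed(E):' sweep over the component-label array
def altLoop (comp : List Int) (edges : List (Int × Int × Int)) : Int :=
  match edges with
  | [] => 0
  | e :: rest =>
    match PySem.List.pyGet? comp (e.1 - 1), PySem.List.pyGet? comp (e.2.1 - 1) with
    | some a, some b =>
      let comp' := if a ≠ b then comp.map (fun t => if t = b then a else t) else comp
      match PySem.List.pyGet? comp' 0, PySem.List.pyGet? comp' 1 with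
      | some c0, some c1 => if c0 = c1 then e.2.2 else altLoop comp' rest
      | _, _ => 0   -- Python raises IndexError here (excluded by Pre_)
    | _, _ => 0     -- Python raises IndexError here (excluded by Pre_)

def maxmin_edgeval_DFS_alt (V : Int) (E : List (Int × Int × Int)) : Int :=
  let S := PySem.List.sorted E (fun x => x.2.2) false   -- E.sort(key=lambda x: x[2])
  let comp := PySem.List.pyRange 0 V 1                  -- comp = list(range(V))
  altLoop comp S.reverse

-- ===== PRECONDITION & SPEC =====
-- Pre_ excludes the inputs on which A raises IndexError (V < 2 with edges present, or an edge
-- endpoint outside [1-V, V]); on some out-of-range-endpoint inputs A happens to return anyway,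
-- because whether the offending edge ever reaches toNeighbour depends on the binary search's
-- probe path — an accident of A's probing, so the whole out-of-range region is excluded.
def Pre_maxmin_edgeval_DFS (V : Int) (E : List (Int × Int × Int)) : Prop :=
  E = [] ∨ (2 ≤ V ∧ ∀ e ∈ E, 1 - V ≤ e.1 ∧ e.1 ≤ V ∧ 1 - V ≤ e.2.1 ∧ e.2.1 ≤ V)
instance (V : Int) (E : List (Int × Int × Int)) : Decidable (Pre_maxmin_edgeval_DFS V E) := by unfold Pre_maxmin_edgeval_DFS; infer_instance

def pvWitness_maxmin_edgeval_DFS : Int × (List (Int × Int × Int)) :=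
  (4, [(1, 2, 5), (2, 3, 1), (0, 3, 7), (3, 4, 2), (4, 1, 3)])

def Spec_maxmin_edgeval_DFS (V : Int) (E : List (Int × Int × Int)) (out : Int) : Prop := out = maxmin_edgeval_DFS_alt V E
instance (V : Int) (E : List (Int × Int × Int)) (out : Int) : Decidable (Spec_maxmin_edgeval_DFS V E out) := by unfold Spec_maxmin_edgeval_DFS; infer_instance

-- ===== CLAIM (what is proved, stated in full; the proofs are below) =====
def Claim_equal_maxmin_edgeval_DFS : Prop := ∀ (V : Int) (E : List (Int × Int × Int)), Dom_maxmin_edgeval_DFS V E → Pre_maxmin_edgeval_DFS V E → Spec_maxmin_edgeval_DFS V E (maxmin_edgeval_DFS V E)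

-- ===== LEMMAS AND PROOFS =====

-- the vertex an edge endpoint x refers to: Python index x-1 into a length-V list
def nrm (V x : Int) : Nat := normk V.toNat (x - 1)

def rangeOK (V : Int) (e : Int × Int × Int) : Prop :=
  1 - V ≤ e.1 ∧ e.1 ≤ V ∧ 1 - V ≤ e.2.1 ∧ e.2.1 ≤ V

-- adjacency and connectivity of the (normalised) graph of an edge list
def Adj (V : Int) (S : List (Int × Int × Int)) (u v : Nat) : Prop :=
  ∃ e ∈ S, (u = nrm V e.1 ∧ v = nrm V e.2.1) ∨ (u = nrm V e.2.1 ∧ v = nrm V e.1)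

def Conn (V : Int) (S : List (Int × Int × Int)) (u v : Nat) : Prop :=
  Relation.ReflTransGen (Adj V S) u v

theorem adj_symm (V : Int) (S : List (Int × Int × Int)) {u v : Nat}
    (h : Adj V S u v) : Adj V S v u := by
  obtain ⟨e, he, h⟩ := h; exact ⟨e, he, by tauto⟩

theorem conn_symm {V : Int} {S : List (Int × Int × Int)} {u v : Nat}
    (h : Conn V S u v) : Conn V S v u :=
  Relation.ReflTransGen.symmetric (fun _ _ hh => adj_symm V S hh) h

theorem conn_mono {V : Int} {S S' : List (Int × Int × Int)} (hsub : ∀ e ∈ S, e ∈ S')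
    {u v : Nat} (h : Conn V S u v) : Conn V S' u v :=
  Relation.ReflTransGen.mono (fun _ _ ⟨e, he, hh⟩ => ⟨e, hsub e he, hh⟩) h

theorem conn_nil {V : Int} {u v : Nat} : Conn V [] u v ↔ u = v := by
  constructor
  · intro h
    induction h with
    | refl => rfl
    | tail _ h2 ih => obtain ⟨e, he, _⟩ := h2; cases he
  · rintro rfl; exact Relation.ReflTransGen.refl

theorem nrm_lt {V x : Int} (hV : 2 ≤ V) (h1 : 1 - V ≤ x) (h2 : x ≤ V) : nrm V x < V.toNat := by
  have hVt : (V.toNat : Int) = V := Int.toNat_of_nonneg (by omega)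
  exact normk_lt _ _ (by omega) (by omega)

theorem conn_drop_mono {V : Int} {S : List (Int × Int × Int)} {m m' : Nat} (h : m ≤ m')
    {u v : Nat} (hc : Conn V (S.drop m') u v) : Conn V (S.drop m) u v := by
  refine conn_mono ?_ hc
  intro e he
  rw [show m' = m + (m' - m) by omega, ← List.drop_drop] at he
  exact List.mem_of_mem_drop he

theorem conn_ge_length {V : Int} {S : List (Int × Int × Int)} {m : Nat}
    (h : S.length ≤ m) : ¬ Conn V (S.drop m) 0 1 := by
  rw [List.drop_eq_nil_iff.2 h]
  intro hc
  exact absurd (conn_nil.1 hc) (by omega)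

-- adding one edge to the graph: the classic connectivity decomposition
theorem conn_cons {V : Int} {P : List (Int × Int × Int)} {e : Int × Int × Int} {i j : Nat} :
    Conn V (e :: P) i j ↔
      Conn V P i j ∨
      (Conn V P i (nrm V e.1) ∧ Conn V P (nrm V e.2.1) j) ∨
      (Conn V P i (nrm V e.2.1) ∧ Conn V P (nrm V e.1) j) := by
  constructor
  · intro h
    induction h with
    | refl => exact Or.inl Relation.ReflTransGen.refl
    | tail h1 h2 ih =>
      obtain ⟨f, hf, hor⟩ := h2
      rcases List.mem_cons.1 hf with rfl | hfP
      · rcases hor with ⟨rfl, rfl⟩ | ⟨rfl, rfl⟩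
        · rcases ih with h | ⟨ha, hb⟩ | ⟨ha, hb⟩
          · exact Or.inr (Or.inl ⟨h, Relation.ReflTransGen.refl⟩)
          · exact Or.inr (Or.inl ⟨ha, Relation.ReflTransGen.refl⟩)
          · exact Or.inl ha
        · rcases ih with h | ⟨ha, hb⟩ | ⟨ha, hb⟩
          · exact Or.inr (Or.inr ⟨h, Relation.ReflTransGen.refl⟩)
          · exact Or.inl ha
          · exact Or.inr (Or.inr ⟨ha, Relation.ReflTransGen.refl⟩)
      · have hstep : Adj V P _ _ := ⟨f, hfP, hor⟩
        rcases ih with h | ⟨ha, hb⟩ | ⟨ha, hb⟩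
        · exact Or.inl (h.tail hstep)
        · exact Or.inr (Or.inl ⟨ha, hb.tail hstep⟩)
        · exact Or.inr (Or.inr ⟨ha, hb.tail hstep⟩)
  · intro h
    have hsub : ∀ f ∈ P, f ∈ e :: P := fun f hf => List.mem_cons_of_mem _ hf
    have hedge : Conn V (e :: P) (nrm V e.1) (nrm V e.2.1) :=
      Relation.ReflTransGen.single ⟨e, List.mem_cons_self, Or.inl ⟨rfl, rfl⟩⟩
    rcases h with h | ⟨ha, hb⟩ | ⟨ha, hb⟩
    · exact conn_mono hsub h
    · exact ((conn_mono hsub ha).trans hedge).trans (conn_mono hsub hb)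
    · exact ((conn_mono hsub ha).trans (conn_symm hedge)).trans (conn_mono hsub hb)

-- ===== B-side: the component-label array tracks connectivity =====

def InvB (V : Int) (P : List (Int × Int × Int)) (comp : List Int) : Prop :=
  comp.length = V.toNat ∧
  ∀ (i j : Nat) (hi : i < comp.length) (hj : j < comp.length),
    (comp[i]'hi = comp[j]'hj ↔ Conn V P i j)

theorem invB_init (V : Int) : InvB V [] (PySem.List.pyRange 0 V 1) := by
  constructor
  · simp [PySem.List.length_pyRange_one]
  · intro i j hi hj
    rw [PySem.List.getElem_pyRange_one, PySem.List.getElem_pyRange_one, conn_nil]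
    omega

theorem pvCollapse_eq (a b u v : Int) :
    ((if u = b then a else u) = (if v = b then a else v)) ↔
      (u = v ∨ (u = a ∧ v = b) ∨ (u = b ∧ v = a)) := by
  split_ifs <;> omega

theorem invB_step {V : Int} {P : List (Int × Int × Int)} {e : Int × Int × Int}
    {comp : List Int} (hV : 2 ≤ V) (he : rangeOK V e) (hinv : InvB V P comp)
    (h1 : nrm V e.1 < comp.length) (h2 : nrm V e.2.1 < comp.length) :
    InvB V (e :: P)
      (if comp[nrm V e.1]'h1 ≠ comp[nrm V e.2.1]'h2
       then comp.map (fun t => if t = comp[nrm V e.2.1]'h2 then comp[nrm V e.1]'h1 else t)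
       else comp) := by
  obtain ⟨hlen, hiff⟩ := hinv
  set a := comp[nrm V e.1]'h1 with ha
  set b := comp[nrm V e.2.1]'h2 with hb
  by_cases hab : a = b
  · rw [if_neg (by simpa using hab)]
    refine ⟨hlen, fun i j hi hj => ?_⟩
    rw [hiff i j hi hj, conn_cons]
    have hcn : Conn V P (nrm V e.1) (nrm V e.2.1) := (hiff _ _ h1 h2).1 hab
    constructor
    · intro h; exact Or.inl h
    · rintro (h | ⟨hx, hy⟩ | ⟨hx, hy⟩)
      · exact h
      · exact (hx.trans hcn).trans hy
      · exact (hx.trans (conn_symm hcn)).trans hy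
  · rw [if_pos (by simpa using hab)]
    refine ⟨by simpa using hlen, fun i j hi hj => ?_⟩
    have hi' : i < comp.length := by simpa using hi
    have hj' : j < comp.length := by simpa using hj
    rw [List.getElem_map, List.getElem_map, pvCollapse_eq, conn_cons]
    rw [hiff i j hi' hj']
    have e1 : (comp[i]'hi' = a ↔ Conn V P i (nrm V e.1)) := hiff i _ hi' h1
    have e2 : (comp[i]'hi' = b ↔ Conn V P i (nrm V e.2.1)) := hiff i _ hi' h2
    have e3 : (comp[j]'hj' = a ↔ Conn V P j (nrm V e.1)) := hiff j _ hj' h1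
    have e4 : (comp[j]'hj' = b ↔ Conn V P j (nrm V e.2.1)) := hiff j _ hj' h2
    rw [e1, e2, e3, e4]
    constructor
    · rintro (h | ⟨hx, hy⟩ | ⟨hx, hy⟩)
      · exact Or.inl h
      · exact Or.inr (Or.inl ⟨hx, conn_symm hy⟩)
      · exact Or.inr (Or.inr ⟨hx, conn_symm hy⟩)
    · rintro (h | ⟨hx, hy⟩ | ⟨hx, hy⟩)
      · exact Or.inl h
      · exact Or.inr (Or.inl ⟨hx, conn_symm hy⟩)
      · exact Or.inr (Or.inr ⟨hx, conn_symm hy⟩)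

-- common shape of both results: weight of the last suffix-connecting index, else 0
def ScanRes (V : Int) (S : List (Int × Int × Int)) (r : Int) : Prop :=
  (∃ (m : Nat) (e : Int × Int × Int), Conn V (S.drop m) 0 1 ∧
    (∀ m' : Nat, m < m' → ¬ Conn V (S.drop m') 0 1) ∧ S[m]? = some e ∧ r = e.2.2) ∨
  ((∀ m : Nat, ¬ Conn V (S.drop m) 0 1) ∧ r = 0)

theorem scanRes_unique {V : Int} {S : List (Int × Int × Int)} {r r' : Int}
    (h : ScanRes V S r) (h' : ScanRes V S r') : r = r' := by
  rcases h with ⟨m, e, hq, hmax, hget, hr⟩ | ⟨hall, hr⟩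
  · rcases h' with ⟨m', e', hq', hmax', hget', hr'⟩ | ⟨hall', _⟩
    · have : m = m' := by
        by_contra hne
        rcases Nat.lt_or_ge m m' with hlt | hge
        · exact hmax m' hlt hq'
        · exact hmax' m (by omega) hq
      subst this
      rw [hget] at hget'
      rw [hr, hr', Option.some.inj hget']
    · exact absurd hq (hall' m)
  · rcases h' with ⟨m', e', hq', _, _, _⟩ | ⟨_, hr'⟩
    · exact absurd hq' (hall m')
    · rw [hr, hr']

-- reading comp[x-1] for an edge endpoint x
theorem pyGet?_pred {α : Type} (l : List α) (V x : Int) (hV : 2 ≤ V) (hlen : l.length = V.toNat)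
    (hx1 : 1 - V ≤ x) (hx2 : x ≤ V) (h : nrm V x < l.length) :
    PySem.List.pyGet? l (x - 1) = some (l[nrm V x]'h) := by
  have hVt : (V.toNat : Int) = V := Int.toNat_of_nonneg (by omega)
  have h1 : -(l.length : Int) ≤ x - 1 := by rw [hlen, hVt]; omega
  have h2 : x - 1 < (l.length : Int) := by rw [hlen, hVt]; omega
  rw [pyGet?_eq_getElem?_norm l _ h1 h2]
  have hn : normk l.length (x - 1) = nrm V x := by rw [hlen]; rfl
  rw [hn, List.getElem?_eq_getElem h]

theorem normk_lt' (V : Int) (hV : 2 ≤ V) (w : Int) (h1 : -V ≤ w) (h2 : w < V) :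
    normk V.toNat w < V.toNat :=
  normk_lt _ _ (by rw [Int.toNat_of_nonneg (by omega : (0:Int) ≤ V)]; exact h1)
    (by rw [Int.toNat_of_nonneg (by omega : (0:Int) ≤ V)]; exact h2)

-- reading l[w] for a raw vertex value w
theorem pyGet?_vert {α : Type} (l : List α) (V w : Int) (hV : 2 ≤ V) (hlen : l.length = V.toNat)
    (h1 : -V ≤ w) (h2 : w < V) :
    PySem.List.pyGet? l w = l[normk V.toNat w]? := by
  have hVt : (V.toNat : Int) = V := Int.toNat_of_nonneg (by omega)
  rw [pyGet?_eq_getElem?_norm l w (by rw [hlen, hVt]; exact h1) (by rw [hlen, hVt]; exact h2), hlen]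

theorem altLoop_cons_eq (comp : List Int) (e : Int × Int × Int) (rest : List (Int × Int × Int))
    (a b c0 c1 : Int)
    (h1 : PySem.List.pyGet? comp (e.1 - 1) = some a)
    (h2 : PySem.List.pyGet? comp (e.2.1 - 1) = some b)
    (h3 : PySem.List.pyGet? (if a ≠ b then comp.map (fun t => if t = b then a else t) else comp) 0 = some c0)
    (h4 : PySem.List.pyGet? (if a ≠ b then comp.map (fun t => if t = b then a else t) else comp) 1 = some c1) :
    altLoop comp (e :: rest) = if c0 = c1 then e.2.2
      else altLoop (if a ≠ b then comp.map (fun t => if t = b then a else t) else comp) rest := by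
  simp only [altLoop, h1, h2, h3, h4]

theorem altLoop_spec (V : Int) (S : List (Int × Int × Int)) (hV : 2 ≤ V)
    (hrange : ∀ e ∈ S, rangeOK V e) :
    ∀ (t : Nat), t ≤ S.length → ∀ (comp : List Int), InvB V (S.drop t) comp →
      ¬ Conn V (S.drop t) 0 1 →
      (∃ (m : Nat) (e : Int × Int × Int), Conn V (S.drop m) 0 1 ∧
        (∀ m' : Nat, m < m' → ¬ Conn V (S.drop m') 0 1) ∧ S[m]? = some e ∧
        altLoop comp (S.take t).reverse = e.2.2) ∨
      ((∀ m : Nat, m < t → ¬ Conn V (S.drop m) 0 1) ∧ altLoop comp (S.take t).reverse = 0) := by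
  intro t
  induction t with
  | zero =>
    intro _ comp _ _
    exact Or.inr ⟨fun m hm => absurd hm (by omega), by simp [altLoop]⟩
  | succ t ih =>
    intro ht comp hinv hnc
    have htlt : t < S.length := by omega
    obtain ⟨hlen, hiff⟩ := hinv
    have heS : rangeOK V (S[t]'htlt) := hrange _ (List.getElem_mem htlt)
    have hdrop : S.drop t = S[t]'htlt :: S.drop (t + 1) := List.drop_eq_getElem_cons htlt
    have htake : (S.take (t + 1)).reverse = S[t]'htlt :: (S.take t).reverse := by
      rw [List.take_add_one]
      simp [List.getElem?_eq_getElem htlt]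
    have hb1 : nrm V (S[t]'htlt).1 < comp.length := by rw [hlen]; exact nrm_lt hV heS.1 heS.2.1
    have hb2 : nrm V (S[t]'htlt).2.1 < comp.length := by
      rw [hlen]; exact nrm_lt hV heS.2.2.1 heS.2.2.2
    have hget1 := pyGet?_pred comp V (S[t]'htlt).1 hV hlen heS.1 heS.2.1 hb1
    have hget2 := pyGet?_pred comp V (S[t]'htlt).2.1 hV hlen heS.2.2.1 heS.2.2.2 hb2
    have hinv' : InvB V (S.drop t)
        (if comp[nrm V (S[t]'htlt).1]'hb1 ≠ comp[nrm V (S[t]'htlt).2.1]'hb2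
         then comp.map (fun u => if u = comp[nrm V (S[t]'htlt).2.1]'hb2
                                 then comp[nrm V (S[t]'htlt).1]'hb1 else u)
         else comp) := by
      rw [hdrop]; exact invB_step hV heS ⟨hlen, hiff⟩ hb1 hb2
    set comp' := (if comp[nrm V (S[t]'htlt).1]'hb1 ≠ comp[nrm V (S[t]'htlt).2.1]'hb2
         then comp.map (fun u => if u = comp[nrm V (S[t]'htlt).2.1]'hb2
                                 then comp[nrm V (S[t]'htlt).1]'hb1 else u)
         else comp) with hcomp'
    have hlen' : comp'.length = V.toNat := hinv'.1
    have h0lt : (0 : Nat) < comp'.length := by omega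
    have h1lt : (1 : Nat) < comp'.length := by omega
    have hget0 : PySem.List.pyGet? comp' 0 = some (comp'[0]'h0lt) := by
      rw [pyGet?_vert comp' V 0 hV hlen' (by omega) (by omega)]
      have : normk V.toNat 0 = 0 := by simp [normk]
      rw [this, List.getElem?_eq_getElem h0lt]
    have hget1' : PySem.List.pyGet? comp' 1 = some (comp'[1]'h1lt) := by
      rw [pyGet?_vert comp' V 1 hV hlen' (by omega) (by omega)]
      have : normk V.toNat 1 = 1 := by simp [normk]
      rw [this, List.getElem?_eq_getElem h1lt]
    rw [htake, altLoop_cons_eq comp _ _ _ _ _ _ hget1 hget2 hget0 hget1']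
    by_cases hc01 : comp'[0]'h0lt = comp'[1]'h1lt
    · rw [if_pos hc01]
      have hQt : Conn V (S.drop t) 0 1 := (hinv'.2 0 1 h0lt h1lt).1 hc01
      refine Or.inl ⟨t, S[t]'htlt, hQt, ?_, List.getElem?_eq_getElem htlt, rfl⟩
      intro m' hm' hcm'
      exact hnc (conn_drop_mono (by omega) hcm')
    · rw [if_neg hc01]
      have hnt : ¬ Conn V (S.drop t) 0 1 := fun hc => hc01 ((hinv'.2 0 1 h0lt h1lt).2 hc)
      rcases ih (by omega) comp' hinv' hnt with ⟨m, e', hq, hmax, hgt, hres⟩ | ⟨hall, hres⟩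
      · exact Or.inl ⟨m, e', hq, hmax, hgt, hres⟩
      · refine Or.inr ⟨?_, hres⟩
        intro m hm
        by_cases hmt : m < t
        · exact hall m hmt
        · have hmeq : m = t := by omega
          subst hmeq; exact hnt

-- ===== A-side: toNeighbour builds exactly the adjacency lists =====

def pvStep (g : List (List Int)) (e : Int × Int × Int) : List (List Int) :=
  let g1 := match PySem.List.pyGet? g (e.1 - 1) with
    | some l => PySem.List.pySetD g (e.1 - 1) (l ++ [e.2.1 - 1])
    | none => g
  match PySem.List.pyGet? g1 (e.2.1 - 1) with
    | some l => PySem.List.pySetD g1 (e.2.1 - 1) (l ++ [e.1 - 1])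
    | none => g1

theorem toNeighbour_eq (V : Int) (S : List (Int × Int × Int)) :
    toNeighbour V S = S.foldl pvStep ((PySem.List.pyRange 0 V 1).map (fun _ => [])) := rfl

theorem pvStep_length (g : List (List Int)) (e : Int × Int × Int) :
    (pvStep g e).length = g.length := by
  unfold pvStep
  dsimp only
  split <;> split <;> simp [PySem.List.length_pySetD]

theorem pvFold_length (T : List (Int × Int × Int)) (g : List (List Int)) :
    (T.foldl pvStep g).length = g.length := by
  induction T generalizing g with
  | nil => rfl
  | cons e T ih => rw [List.foldl_cons, ih, pvStep_length]

def Contrib (V : Int) (T : List (Int × Int × Int)) (i : Nat) (w : Int) : Prop :=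
  ∃ e ∈ T, (nrm V e.1 = i ∧ w = e.2.1 - 1) ∨ (nrm V e.2.1 = i ∧ w = e.1 - 1)

theorem contrib_cons {V : Int} {e : Int × Int × Int} {T : List (Int × Int × Int)} {i : Nat} {w : Int} :
    Contrib V (e :: T) i w ↔
      ((nrm V e.1 = i ∧ w = e.2.1 - 1) ∨ (nrm V e.2.1 = i ∧ w = e.1 - 1)) ∨ Contrib V T i w := by
  simp only [Contrib, List.mem_cons]
  constructor
  · rintro ⟨f, (rfl | hf), h⟩
    · exact Or.inl h
    · exact Or.inr ⟨f, hf, h⟩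
  · rintro (h | ⟨f, hf, h⟩)
    · exact ⟨e, Or.inl rfl, h⟩
    · exact ⟨f, Or.inr hf, h⟩

theorem pvStep_mem (V : Int) (hV : 2 ≤ V) (e : Int × Int × Int) (he : rangeOK V e)
    (g : List (List Int)) (hlen : g.length = V.toNat) (i : Nat) (hi : i < g.length)
    (hi' : i < (pvStep g e).length) (w : Int) :
    w ∈ (pvStep g e)[i]'hi' ↔
      w ∈ g[i]'hi ∨ (nrm V e.1 = i ∧ w = e.2.1 - 1) ∨ (nrm V e.2.1 = i ∧ w = e.1 - 1) := by
  obtain ⟨he1, he2, he3, he4⟩ := he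
  have hVt : (V.toNat : Int) = V := Int.toNat_of_nonneg (by omega)
  have hx1 : -(g.length : Int) ≤ e.1 - 1 := by rw [hlen, hVt]; omega
  have hx2 : e.1 - 1 < (g.length : Int) := by rw [hlen, hVt]; omega
  have hk1lt : nrm V e.1 < g.length := by rw [hlen]; exact nrm_lt hV he1 he2
  have hget1 : PySem.List.pyGet? g (e.1 - 1) = some (g[nrm V e.1]'hk1lt) :=
    pyGet?_pred g V e.1 hV hlen he1 he2 hk1lt
  have hn1 : normk g.length (e.1 - 1) = nrm V e.1 := by rw [hlen]; rfl
  have hg1len : (g.set (nrm V e.1) ((g[nrm V e.1]'hk1lt) ++ [e.2.1 - 1])).length = g.length := by simp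
  have hk2lt : nrm V e.2.1 < (g.set (nrm V e.1) ((g[nrm V e.1]'hk1lt) ++ [e.2.1 - 1])).length := by
    rw [hg1len, hlen]; exact nrm_lt hV he3 he4
  have hget2 := pyGet?_pred (g.set (nrm V e.1) ((g[nrm V e.1]'hk1lt) ++ [e.2.1 - 1]))
    V e.2.1 hV (by rw [hg1len, hlen]) he3 he4 hk2lt
  have hx1' : -((g.set (nrm V e.1) ((g[nrm V e.1]'hk1lt) ++ [e.2.1 - 1])).length : Int) ≤ e.2.1 - 1 := by
    rw [hg1len, hlen, hVt]; omega
  have hx2' : e.2.1 - 1 < ((g.set (nrm V e.1) ((g[nrm V e.1]'hk1lt) ++ [e.2.1 - 1])).length : Int) := by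
    rw [hg1len, hlen, hVt]; omega
  have hn2 : normk (g.set (nrm V e.1) ((g[nrm V e.1]'hk1lt) ++ [e.2.1 - 1])).length (e.2.1 - 1)
      = nrm V e.2.1 := by rw [hg1len, hlen]; rfl
  have hpv : pvStep g e =
      (g.set (nrm V e.1) ((g[nrm V e.1]'hk1lt) ++ [e.2.1 - 1])).set (nrm V e.2.1)
        (((g.set (nrm V e.1) ((g[nrm V e.1]'hk1lt) ++ [e.2.1 - 1]))[nrm V e.2.1]'hk2lt) ++ [e.1 - 1]) := by
    unfold pvStep
    rw [hget1]
    dsimp only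
    rw [pySetD_eq_set_norm g _ _ hx1 hx2, hn1, hget2]
    dsimp only
    rw [pySetD_eq_set_norm _ _ _ hx1' hx2', hn2]
  simp only [hpv]
  simp only [List.getElem_set, List.mem_append, List.mem_singleton]
  split_ifs <;> simp_all

theorem pvFold_mem (V : Int) (hV : 2 ≤ V) :
    ∀ (T : List (Int × Int × Int)) (g : List (List Int)), g.length = V.toNat →
      (∀ e ∈ T, rangeOK V e) →
      ∀ (i : Nat) (hgi : i < g.length) (hfi : i < (T.foldl pvStep g).length) (w : Int),
        (w ∈ (T.foldl pvStep g)[i]'hfi ↔ w ∈ g[i]'hgi ∨ Contrib V T i w) := by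
  intro T
  induction T with
  | nil =>
    intro g _ _ i hgi hfi w
    simp [Contrib]
  | cons e T ih =>
    intro g hlen hr i hgi hfi w
    rw [List.foldl_cons] at hfi
    have hstepi : i < (pvStep g e).length := by rw [pvStep_length]; exact hgi
    have h1 := ih (pvStep g e) (by rw [pvStep_length]; exact hlen)
      (fun f hf => hr f (List.mem_cons_of_mem _ hf)) i hstepi hfi w
    have h2 := pvStep_mem V hV e (hr e List.mem_cons_self) g hlen i hgi hstepi w
    refine Iff.trans h1 ?_
    rw [h2, contrib_cons]
    tauto

theorem toNeighbour_length (V : Int) (S : List (Int × Int × Int)) :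
    (toNeighbour V S).length = V.toNat := by
  rw [toNeighbour_eq, pvFold_length]
  simp [PySem.List.length_pyRange_one]

theorem toNeighbour_mem (V : Int) (S : List (Int × Int × Int)) (hV : 2 ≤ V)
    (hrange : ∀ e ∈ S, rangeOK V e) (i : Nat) (hi : i < (toNeighbour V S).length) (w : Int) :
    w ∈ (toNeighbour V S)[i]'hi ↔ Contrib V S i w := by
  have hbl : ((PySem.List.pyRange 0 V 1).map (fun _ => ([] : List Int))).length = V.toNat := by
    simp [PySem.List.length_pyRange_one]
  have hi0 : i < ((PySem.List.pyRange 0 V 1).map (fun _ => ([] : List Int))).length := by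
    rw [hbl]; rw [toNeighbour_length] at hi; exact hi
  have hi1 : i < (S.foldl pvStep ((PySem.List.pyRange 0 V 1).map (fun _ => ([] : List Int)))).length := by
    rw [← toNeighbour_eq]; exact hi
  have h := pvFold_mem V hV S _ hbl hrange i hi0 hi1 w
  refine Iff.trans h ?_
  simp

theorem contrib_range {V : Int} {S : List (Int × Int × Int)} (hV : 2 ≤ V)
    (hrange : ∀ e ∈ S, rangeOK V e) {i : Nat} {w : Int} (h : Contrib V S i w) :
    -V ≤ w ∧ w < V ∧ Adj V S i (normk V.toNat w) := by
  obtain ⟨e, he, h⟩ := h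
  obtain ⟨hr1, hr2, hr3, hr4⟩ := hrange e he
  rcases h with ⟨hni, hw⟩ | ⟨hni, hw⟩
  · refine ⟨by omega, by omega, ⟨e, he, Or.inl ⟨hni.symm, ?_⟩⟩⟩
    rw [hw]; rfl
  · refine ⟨by omega, by omega, ⟨e, he, Or.inr ⟨hni.symm, ?_⟩⟩⟩
    rw [hw]; rfl

theorem adj_contrib {V : Int} {S : List (Int × Int × Int)} {i j : Nat} (h : Adj V S i j) :
    ∃ w : Int, Contrib V S i w ∧ normk V.toNat w = j := by
  obtain ⟨e, he, h⟩ := h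
  rcases h with ⟨hu, hv⟩ | ⟨hu, hv⟩
  · exact ⟨e.2.1 - 1, ⟨e, he, Or.inl ⟨hu.symm, rfl⟩⟩, hv.symm⟩
  · exact ⟨e.1 - 1, ⟨e, he, Or.inr ⟨hu.symm, rfl⟩⟩, hv.symm⟩

-- ===== A-side: the DFS loop =====

theorem dfsStep_eq_of_false (V : Int) (vis : List Bool) (rest : List Int) (w : Int)
    (hV : 2 ≤ V) (hlen : vis.length = V.toNat) (h1 : -V ≤ w) (h2 : w < V)
    (hk : normk V.toNat w < vis.length)
    (hv : vis[normk V.toNat w]'hk = false) :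
    dfsStep (vis, rest) w = (vis.set (normk V.toNat w) true, rest ++ [w]) := by
  have hVt : (V.toNat : Int) = V := Int.toNat_of_nonneg (by omega)
  have hh1 : -(vis.length : Int) ≤ w := by rw [hlen, hVt]; exact h1
  have hh2 : w < (vis.length : Int) := by rw [hlen, hVt]; exact h2
  have hnk : normk vis.length w = normk V.toNat w := by rw [hlen]
  unfold dfsStep
  dsimp only
  rw [pyGet?_eq_getElem?_norm vis w hh1 hh2, hnk, List.getElem?_eq_getElem hk, hv]
  dsimp only
  rw [pySetD_eq_set_norm vis w true hh1 hh2, hnk]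

theorem dfsStep_eq_of_true (V : Int) (vis : List Bool) (rest : List Int) (w : Int)
    (hV : 2 ≤ V) (hlen : vis.length = V.toNat) (h1 : -V ≤ w) (h2 : w < V)
    (hk : normk V.toNat w < vis.length)
    (hv : vis[normk V.toNat w]'hk = true) :
    dfsStep (vis, rest) w = (vis, rest) := by
  have hVt : (V.toNat : Int) = V := Int.toNat_of_nonneg (by omega)
  have hh1 : -(vis.length : Int) ≤ w := by rw [hlen, hVt]; exact h1
  have hh2 : w < (vis.length : Int) := by rw [hlen, hVt]; exact h2
  have hnk : normk vis.length w = normk V.toNat w := by rw [hlen]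
  unfold dfsStep
  dsimp only
  rw [pyGet?_eq_getElem?_norm vis w hh1 hh2, hnk, List.getElem?_eq_getElem hk, hv]

theorem fold_inv (V : Int) (S : List (Int × Int × Int)) (hV : 2 ≤ V) :
    ∀ (nbrs : List Int) (vis : List Bool) (rest : List Int),
      vis.length = V.toNat →
      (∀ q ∈ rest, PySem.List.pyGet? vis q = some true) →
      (∀ i : Nat, vis[i]? = some true → Conn V S 0 i) →
      (∀ w ∈ nbrs, -V ≤ w ∧ w < V ∧ Conn V S 0 (normk V.toNat w)) →
      (nbrs.foldl dfsStep (vis, rest)).1.length = V.toNat ∧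
      (∀ q ∈ (nbrs.foldl dfsStep (vis, rest)).2,
          PySem.List.pyGet? (nbrs.foldl dfsStep (vis, rest)).1 q = some true) ∧
      (∀ i : Nat, (nbrs.foldl dfsStep (vis, rest)).1[i]? = some true → Conn V S 0 i) ∧
      (∀ i : Nat, vis[i]? = some true → (nbrs.foldl dfsStep (vis, rest)).1[i]? = some true) ∧
      (∀ w ∈ nbrs, PySem.List.pyGet? (nbrs.foldl dfsStep (vis, rest)).1 w = some true) ∧
      (∀ q ∈ rest, q ∈ (nbrs.foldl dfsStep (vis, rest)).2) ∧
      (∀ i : Nat, (nbrs.foldl dfsStep (vis, rest)).1[i]? = some true →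
          vis[i]? = some true ∨ ∃ q ∈ (nbrs.foldl dfsStep (vis, rest)).2, normk V.toNat q = i) := by
  intro nbrs
  induction nbrs with
  | nil =>
    intro vis rest hlen hb hc _
    exact ⟨hlen, hb, hc, fun _ h => h, by simp, fun q hq => hq, fun _ h => Or.inl h⟩
  | cons w ws ih =>
    intro vis rest hlen hb hc hn
    obtain ⟨hw1, hw2, hwconn⟩ := hn w List.mem_cons_self
    have hk : normk V.toNat w < vis.length := by rw [hlen]; exact normk_lt' V hV w hw1 hw2
    rw [List.foldl_cons]
    rcases hvw : vis[normk V.toNat w]'hk with _ | _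
    · -- not yet visited: mark and push
      rw [dfsStep_eq_of_false V vis rest w hV hlen hw1 hw2 hk hvw]
      have hvl : (vis.set (normk V.toNat w) true).length = vis.length := by simp
      have hlen' : (vis.set (normk V.toNat w) true).length = V.toNat := by rw [hvl, hlen]
      have hb' : ∀ q ∈ rest ++ [w],
          PySem.List.pyGet? (vis.set (normk V.toNat w) true) q = some true := by
        intro q hq
        rcases List.mem_append.1 hq with hq | hq
        · have hold := hb q hq
          obtain ⟨hr1, hr2⟩ := InRange_of_pyGet?_some hold
          rw [pyGet?_eq_getElem?_norm _ _ hr1 hr2] at hold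
          rw [pyGet?_eq_getElem?_norm _ q (by rw [hvl]; exact hr1) (by rw [hvl]; exact hr2), hvl]
          by_cases hqk : normk vis.length q = normk V.toNat w
          · rw [hqk, List.getElem?_set_self hk]
          · rw [List.getElem?_set_ne (fun hh => hqk hh.symm)]
            exact hold
        · rw [List.mem_singleton] at hq
          subst hq
          rw [pyGet?_vert _ V q hV hlen' hw1 hw2, List.getElem?_set_self hk]
      have hc' : ∀ i : Nat, (vis.set (normk V.toNat w) true)[i]? = some true → Conn V S 0 i := by
        intro i hi
        by_cases hik : i = normk V.toNat w
        · subst hik; exact hwconn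
        · rw [List.getElem?_set_ne (fun hh => hik hh.symm)] at hi
          exact hc i hi
      obtain ⟨c1, c2, c3, c4, c5, c6, c7⟩ := ih (vis.set (normk V.toNat w) true) (rest ++ [w])
        hlen' hb' hc' (fun u hu => hn u (List.mem_cons_of_mem _ hu))
      refine ⟨c1, c2, c3, ?_, ?_, ?_, ?_⟩
      · intro i hi
        apply c4
        by_cases hik : i = normk V.toNat w
        · subst hik; rw [List.getElem?_set_self hk]
        · rw [List.getElem?_set_ne (fun hh => hik hh.symm)]
          exact hi
      · intro u hu
        rcases List.mem_cons.1 hu with rfl | hu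
        · have hvis' : (vis.set (normk V.toNat u) true)[normk V.toNat u]? = some true := by
            rw [List.getElem?_set_self hk]
          have hfin := c4 _ hvis'
          rw [pyGet?_vert _ V u hV c1 hw1 hw2]
          exact hfin
        · exact c5 u hu
      · intro q hq
        exact c6 q (List.mem_append_left _ hq)
      · intro i hi
        rcases c7 i hi with hvi | hex
        · by_cases hik : i = normk V.toNat w
          · subst hik
            exact Or.inr ⟨w, c6 w (List.mem_append_right _ (List.mem_singleton.2 rfl)), rfl⟩
          · rw [List.getElem?_set_ne (fun hh => hik hh.symm)] at hvi
            exact Or.inl hvi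
        · exact Or.inr hex
    · -- already visited: skip
      rw [dfsStep_eq_of_true V vis rest w hV hlen hw1 hw2 hk hvw]
      obtain ⟨c1, c2, c3, c4, c5, c6, c7⟩ := ih vis rest hlen hb hc
        (fun u hu => hn u (List.mem_cons_of_mem _ hu))
      refine ⟨c1, c2, c3, c4, ?_, c6, c7⟩
      intro u hu
      rcases List.mem_cons.1 hu with rfl | hu
      · have hvis : vis[normk V.toNat u]? = some true := by
          rw [List.getElem?_eq_getElem hk, hvw]
        have hfin := c4 _ hvis
        rw [pyGet?_vert _ V u hV c1 hw1 hw2]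
        exact hfin
      · exact c5 u hu

theorem dfsLoop_nil (graph : List (List Int)) (vis : List Bool) :
    dfsLoop graph (vis, []) = (PySem.List.pyGet? vis 1).getD false := by
  rw [dfsLoop]

theorem dfsLoop_cons (graph : List (List Int)) (vis : List Bool) (q : Int) (qs : List Int) :
    dfsLoop graph (vis, q :: qs) =
      (if (q :: qs).getLast (List.cons_ne_nil q qs) == 1 then true
       else dfsLoop graph
        (((PySem.List.pyGet? graph ((q :: qs).getLast (List.cons_ne_nil q qs))).getD []).foldl
          dfsStep (vis, (q :: qs).dropLast))) := by
  rw [dfsLoop]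

theorem dfsLoop_empty_iff (V : Int) (S : List (Int × Int × Int)) (hV : 2 ≤ V)
    (vis : List Bool) (hlen : vis.length = V.toNat)
    (hc : ∀ i : Nat, vis[i]? = some true → Conn V S 0 i)
    (hd : ∀ i : Nat, vis[i]? = some true →
      (∃ q ∈ ([] : List Int), normk V.toNat q = i) ∨ (∀ j, Adj V S i j → vis[j]? = some true))
    (he : vis[0]? = some true) :
    (dfsLoop (toNeighbour V S) (vis, []) = true ↔ Conn V S 0 1) := by
  rw [dfsLoop_nil]
  have h1lt : 1 < vis.length := by rw [hlen]; omega
  have hg : PySem.List.pyGet? vis 1 = some (vis[1]'h1lt) := by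
    rw [pyGet?_vert vis V 1 hV hlen (by omega) (by omega)]
    have h : normk V.toNat 1 = 1 := by simp [normk]
    rw [h, List.getElem?_eq_getElem h1lt]
  rw [hg]
  simp only [Option.getD_some]
  constructor
  · intro h
    exact hc 1 (by rw [List.getElem?_eq_getElem h1lt, h])
  · intro h
    have hreach : ∀ j, Conn V S 0 j → vis[j]? = some true := by
      intro j hj
      induction hj with
      | refl => exact he
      | tail h1 h2 ihh =>
        rcases hd _ ihh with ⟨p, hp, _⟩ | hclosed
        · cases hp
        · exact hclosed _ h2
    have hfin := hreach 1 h
    rw [List.getElem?_eq_getElem h1lt] at hfin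
    exact Option.some.inj hfin

theorem dfsLoop_iff (V : Int) (S : List (Int × Int × Int)) (hV : 2 ≤ V)
    (hrange : ∀ e ∈ S, rangeOK V e) :
    ∀ (N : Nat) (vis : List Bool) (que : List Int), dfsMeasure (vis, que) ≤ N →
      vis.length = V.toNat →
      (∀ q ∈ que, PySem.List.pyGet? vis q = some true) →
      (∀ i : Nat, vis[i]? = some true → Conn V S 0 i) →
      (∀ i : Nat, vis[i]? = some true →
        (∃ q ∈ que, normk V.toNat q = i) ∨ (∀ j, Adj V S i j → vis[j]? = some true)) →
      vis[0]? = some true →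
      (dfsLoop (toNeighbour V S) (vis, que) = true ↔ Conn V S 0 1) := by
  intro N
  induction N with
  | zero =>
    intro vis que hm hlen hb hc hd he
    match que with
    | [] => exact dfsLoop_empty_iff V S hV vis hlen hc hd he
    | q :: qs => exact absurd hm (by simp [dfsMeasure])
  | succ N ihN =>
    intro vis que hm hlen hb hc hd he
    match que with
    | [] => exact dfsLoop_empty_iff V S hV vis hlen hc hd he
    | q :: qs =>
      rw [dfsLoop_cons]
      have hvm : (q :: qs).getLast (List.cons_ne_nil q qs) ∈ q :: qs := List.getLast_mem _
      have hvt := hb _ hvm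
      obtain ⟨hr1, hr2⟩ := InRange_of_pyGet?_some hvt
      have hVt : (V.toNat : Int) = V := Int.toNat_of_nonneg (by omega)
      have hw1 : -V ≤ (q :: qs).getLast (List.cons_ne_nil q qs) := by
        rw [← hVt, ← hlen]; exact hr1
      have hw2 : (q :: qs).getLast (List.cons_ne_nil q qs) < V := by
        rw [← hVt, ← hlen]; exact hr2
      have hkv : vis[normk V.toNat ((q :: qs).getLast (List.cons_ne_nil q qs))]? = some true := by
        rw [← pyGet?_vert vis V _ hV hlen hw1 hw2]; exact hvt
      by_cases hv1 : (q :: qs).getLast (List.cons_ne_nil q qs) = (1 : Int)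
      · rw [if_pos (by simp [hv1])]
        have h1n : normk V.toNat ((q :: qs).getLast (List.cons_ne_nil q qs)) = 1 := by
          rw [hv1]; simp [normk]
        rw [h1n] at hkv
        exact iff_of_true rfl (hc 1 hkv)
      · rw [if_neg (by simp [hv1])]
        have hglen : (toNeighbour V S).length = V.toNat := toNeighbour_length V S
        have hkvlt : normk V.toNat ((q :: qs).getLast (List.cons_ne_nil q qs)) < (toNeighbour V S).length := by
          rw [hglen]; exact normk_lt' V hV _ hw1 hw2
        have hgget : PySem.List.pyGet? (toNeighbour V S) ((q :: qs).getLast (List.cons_ne_nil q qs)) =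
            some ((toNeighbour V S)[normk V.toNat ((q :: qs).getLast (List.cons_ne_nil q qs))]'hkvlt) := by
          rw [pyGet?_vert _ V _ hV hglen hw1 hw2, List.getElem?_eq_getElem hkvlt]
        rw [hgget]
        simp only [Option.getD_some]
        have hkconn : Conn V S 0 (normk V.toNat ((q :: qs).getLast (List.cons_ne_nil q qs))) := hc _ hkv
        have hn : ∀ u ∈ (toNeighbour V S)[normk V.toNat ((q :: qs).getLast (List.cons_ne_nil q qs))]'hkvlt,
            -V ≤ u ∧ u < V ∧ Conn V S 0 (normk V.toNat u) := by
          intro u hu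
          rw [toNeighbour_mem V S hV hrange _ hkvlt u] at hu
          obtain ⟨hu1, hu2, hadj⟩ := contrib_range hV hrange hu
          exact ⟨hu1, hu2, hkconn.tail hadj⟩
        have hbrest : ∀ p ∈ (q :: qs).dropLast, PySem.List.pyGet? vis p = some true :=
          fun p hp => hb p ((List.dropLast_prefix (q :: qs)).subset hp)
        obtain ⟨c1, c2, c3, c4, c5, c6, c7⟩ :=
          fold_inv V S hV ((toNeighbour V S)[normk V.toNat ((q :: qs).getLast (List.cons_ne_nil q qs))]'hkvlt)
            vis (q :: qs).dropLast hlen hbrest hc hn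
        have hque : (q :: qs).dropLast ++ [(q :: qs).getLast (List.cons_ne_nil q qs)] = q :: qs :=
          List.dropLast_concat_getLast (List.cons_ne_nil q qs)
        have hd' : ∀ i : Nat,
            (((toNeighbour V S)[normk V.toNat ((q :: qs).getLast (List.cons_ne_nil q qs))]'hkvlt).foldl
              dfsStep (vis, (q :: qs).dropLast)).1[i]? = some true →
            (∃ p ∈ (((toNeighbour V S)[normk V.toNat ((q :: qs).getLast (List.cons_ne_nil q qs))]'hkvlt).foldl
              dfsStep (vis, (q :: qs).dropLast)).2, normk V.toNat p = i) ∨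
            (∀ j, Adj V S i j →
              (((toNeighbour V S)[normk V.toNat ((q :: qs).getLast (List.cons_ne_nil q qs))]'hkvlt).foldl
                dfsStep (vis, (q :: qs).dropLast)).1[j]? = some true) := by
          intro i hi
          rcases c7 i hi with hvi | hex
          · rcases hd i hvi with ⟨p, hp, hpn⟩ | hclosed
            · rw [← hque] at hp
              rcases List.mem_append.1 hp with hp | hp
              · exact Or.inl ⟨p, c6 p hp, hpn⟩
              · rw [List.mem_singleton] at hp
                subst hp
                refine Or.inr ?_
                intro j hadj
                rw [← hpn] at hadj
                obtain ⟨u, hcu, hun⟩ := adj_contrib hadj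
                have humem : u ∈ (toNeighbour V S)[normk V.toNat ((q :: qs).getLast (List.cons_ne_nil q qs))]'hkvlt := by
                  rw [toNeighbour_mem V S hV hrange _ hkvlt u]
                  exact hcu
                obtain ⟨hu1, hu2, _⟩ := hn u humem
                have hu5 := c5 u humem
                rw [pyGet?_vert _ V u hV c1 hu1 hu2] at hu5
                rw [← hun]
                exact hu5
            · exact Or.inr (fun j hadj => c4 j (hclosed j hadj))
          · exact Or.inl hex
        refine ihN _ _ ?_ c1 c2 c3 hd' (c4 0 he)
        have hle := dfsFold_measure
          ((toNeighbour V S)[normk V.toNat ((q :: qs).getLast (List.cons_ne_nil q qs))]'hkvlt)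
          (vis, (q :: qs).dropLast)
        simp only [dfsMeasure, List.length_dropLast, List.length_cons] at hle hm ⊢
        omega

theorem DFS_iff (V : Int) (T : List (Int × Int × Int)) (hV : 2 ≤ V)
    (hrange : ∀ e ∈ T, rangeOK V e) :
    (DFS_array V (toNeighbour V T) = true) ↔ Conn V T 0 1 := by
  have hbl : ((PySem.List.pyRange 0 V 1).map (fun _ => (false : Bool))).length = V.toNat := by
    simp [PySem.List.length_pyRange_one]
  have hpos : 0 < ((PySem.List.pyRange 0 V 1).map (fun _ => (false : Bool))).length := by
    rw [hbl]; omega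
  have hset : PySem.List.pySet? ((PySem.List.pyRange 0 V 1).map (fun _ => (false : Bool))) 0 true
      = some (((PySem.List.pyRange 0 V 1).map (fun _ => (false : Bool))).set 0 true) := by
    unfold PySem.List.pySet?
    rw [pyIdx?_eq_norm _ 0 (by omega) (by exact_mod_cast hpos)]
    simp [normk]
  unfold DFS_array
  dsimp only
  rw [hset]
  dsimp only
  have hvlen : (((PySem.List.pyRange 0 V 1).map (fun _ => (false : Bool))).set 0 true).length = V.toNat := by
    rw [List.length_set, hbl]
  have hv0 : (((PySem.List.pyRange 0 V 1).map (fun _ => (false : Bool))).set 0 true)[0]? = some true :=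
    List.getElem?_set_self hpos
  have hvother : ∀ i : Nat,
      (((PySem.List.pyRange 0 V 1).map (fun _ => (false : Bool))).set 0 true)[i]? = some true → i = 0 := by
    intro i hi
    by_contra hne
    rw [List.getElem?_set_ne (fun hh => hne hh.symm)] at hi
    rcases hgr : ((PySem.List.pyRange 0 V 1).map (fun _ => (false : Bool)))[i]? with _ | b
    · rw [hgr] at hi; cases hi
    · rw [hgr] at hi
      have hmem := List.mem_of_getElem? hgr
      rcases List.mem_map.1 hmem with ⟨x, _, hxb⟩
      rw [← hxb] at hi
      simp at hi
  exact dfsLoop_iff V T hV hrange (dfsMeasure _) _ [0] le_rfl hvlen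
    (by intro p hp
        rw [List.mem_singleton] at hp
        subst hp
        rw [pyGet?_vert _ V 0 hV hvlen (by omega) (by omega)]
        have h0 : normk V.toNat 0 = 0 := by simp [normk]
        rw [h0]; exact hv0)
    (by intro i hi; rw [hvother i hi]; exact Relation.ReflTransGen.refl)
    (by intro i hi
        refine Or.inl ⟨0, List.mem_singleton.2 rfl, ?_⟩
        rw [hvother i hi]; simp [normk])
    hv0

-- ===== A-side: the binary search =====

theorem bsLoop_spec (V : Int) (S : List (Int × Int × Int)) (hV : 2 ≤ V)
    (hrange : ∀ e ∈ S, rangeOK V e) :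
    ∀ (k : Nat) (l r saved : Int), (r - l + 1).toNat ≤ k → 0 ≤ l → l ≤ r + 1 →
      r ≤ (S.length : Int) - 1 →
      ((l = 0 ∧ saved = 0) ∨
        (∃ m : Nat, (m : Int) = l - 1 ∧ Conn V (S.drop m) 0 1 ∧
          ∃ e, S[m]? = some e ∧ saved = e.2.2)) →
      (∀ m : Nat, r < (m : Int) → ¬ Conn V (S.drop m) 0 1) →
      ScanRes V S (bsLoop V S l r saved) := by
  intro k
  induction k with
  | zero =>
    intro l r saved hk h0l hlr1 hrlen hI1 hI2
    rw [bsLoop, dif_neg (by omega)]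
    rcases hI1 with ⟨hl0, hs0⟩ | ⟨m, hm, hq, e, hget, hs⟩
    · exact Or.inr ⟨fun m => hI2 m (by omega), hs0⟩
    · exact Or.inl ⟨m, e, hq, fun m' hmm' => hI2 m' (by omega), hget, hs⟩
  | succ k ih =>
    intro l r saved hk h0l hlr1 hrlen hI1 hI2
    by_cases hlr : l ≤ r
    · rw [bsLoop, dif_pos hlr]
      dsimp only
      have hmb := PySem.Int.floordiv_two_mid_bounds hlr
      have hmid0 : (0:Int) ≤ PySem.Int.floordiv (l + r) 2 := by omega
      have hmlt : PySem.Int.floordiv (l + r) 2 < (S.length : Int) := by omega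
      rw [PySem.List.slice_from S hmid0]
      have hrangeD : ∀ e ∈ S.drop (PySem.Int.floordiv (l + r) 2).toNat, rangeOK V e :=
        fun e he => hrange e (List.mem_of_mem_drop he)
      rcases hdfs : DFS_array V (toNeighbour V (S.drop (PySem.Int.floordiv (l + r) 2).toNat)) with _ | _
      · -- probe failed
        have hnQ : ¬ Conn V (S.drop (PySem.Int.floordiv (l + r) 2).toNat) 0 1 := by
          intro hc
          rw [(DFS_iff V _ hV hrangeD).2 hc] at hdfs
          cases hdfs
        rw [if_neg (by simp [hdfs])]
        refine ih l (PySem.Int.floordiv (l + r) 2 - 1) saved (by omega) h0l (by omega) (by omega)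
          hI1 ?_
        intro m hm
        by_cases hmr : r < (m : Int)
        · exact hI2 m hmr
        · intro hc
          exact hnQ (conn_drop_mono (by omega) hc)
      · -- probe succeeded
        have hQ : Conn V (S.drop (PySem.Int.floordiv (l + r) 2).toNat) 0 1 :=
          (DFS_iff V _ hV hrangeD).1 hdfs
        rw [if_pos (by simp [hdfs])]
        have hmnat : (PySem.Int.floordiv (l + r) 2).toNat < S.length := by omega
        rw [PySem.List.pyGet?_eq_some_getElem S hmid0 hmlt]
        dsimp only
        have hk' : (r - (PySem.Int.floordiv (l + r) 2 + 1) + 1).toNat ≤ k := by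
          clear hI1; omega
        have ha1 : (0 : Int) ≤ PySem.Int.floordiv (l + r) 2 + 1 := by clear hI1; omega
        have ha2 : PySem.Int.floordiv (l + r) 2 + 1 ≤ r + 1 := by clear hI1; omega
        have hmm : ((PySem.Int.floordiv (l + r) 2).toNat : Int) =
            (PySem.Int.floordiv (l + r) 2 + 1) - 1 := by clear hI1; omega
        exact ih (PySem.Int.floordiv (l + r) 2 + 1) r
          (S[(PySem.Int.floordiv (l + r) 2).toNat]'hmnat).2.2 hk' ha1 ha2 hrlen
          (Or.inr ⟨(PySem.Int.floordiv (l + r) 2).toNat, hmm, hQ,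
            S[(PySem.Int.floordiv (l + r) 2).toNat]'hmnat, List.getElem?_eq_getElem hmnat, rfl⟩) hI2
    · rw [bsLoop, dif_neg hlr]
      rcases hI1 with ⟨hl0, hs0⟩ | ⟨m, hm, hq, e, hget, hs⟩
      · exact Or.inr ⟨fun m => hI2 m (by omega), hs0⟩
      · exact Or.inl ⟨m, e, hq, fun m' hmm' => hI2 m' (by omega), hget, hs⟩

-- ===== assembling the verdict =====

theorem maxmin_eq_bsLoop (V : Int) (E : List (Int × Int × Int)) :
    maxmin_edgeval_DFS V E =
      bsLoop V (PySem.List.sorted E (fun x => x.2.2) false) 0 ((E.length : Int) - 1) 0 := rfl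

theorem alt_eq_altLoop (V : Int) (E : List (Int × Int × Int)) :
    maxmin_edgeval_DFS_alt V E =
      altLoop (PySem.List.pyRange 0 V 1) (PySem.List.sorted E (fun x => x.2.2) false).reverse := rfl

-- ===== VERDICT (by name: the statement is the Claim_ definition above) =====
theorem maxmin_edgeval_DFS_spec : Claim_equal_maxmin_edgeval_DFS := by
  intro V E _hdom hpre
  unfold Spec_maxmin_edgeval_DFS
  rcases hpre with rfl | ⟨hV, hrangeE⟩
  · -- E = []
    have hnil : PySem.List.sorted ([] : List (Int × Int × Int)) (fun x => x.2.2) false = [] := by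
      rw [PySem.List.sorted_eq_nil_iff]
    rw [maxmin_eq_bsLoop, alt_eq_altLoop, hnil]
    rw [bsLoop, dif_neg (by norm_num)]
    simp [altLoop]
  · -- E ≠ [] case of Pre_: V ≥ 2 and all endpoints in range
    have hrange : ∀ e ∈ PySem.List.sorted E (fun x => x.2.2) false, rangeOK V e := by
      intro e he
      exact hrangeE e ((PySem.List.mem_sorted E (fun x => x.2.2) false e).1 he)
    have hlenS : (PySem.List.sorted E (fun x => x.2.2) false).length = E.length :=
      PySem.List.length_sorted E (fun x => x.2.2) false
    have hA : ScanRes V (PySem.List.sorted E (fun x => x.2.2) false) (maxmin_edgeval_DFS V E) := by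
      rw [maxmin_eq_bsLoop]
      refine bsLoop_spec V _ hV hrange ((E.length : Int) - 0 + 1).toNat 0 ((E.length : Int) - 1) 0
        (by omega) le_rfl (by omega) (by omega) (Or.inl ⟨rfl, rfl⟩) ?_
      intro m hm
      exact conn_ge_length (by omega)
    have hB : ScanRes V (PySem.List.sorted E (fun x => x.2.2) false) (maxmin_edgeval_DFS_alt V E) := by
      rw [alt_eq_altLoop]
      have h0 := altLoop_spec V (PySem.List.sorted E (fun x => x.2.2) false) hV hrange
        (PySem.List.sorted E (fun x => x.2.2) false).length le_rfl (PySem.List.pyRange 0 V 1)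
        (by rw [List.drop_length]; exact invB_init V)
        (by rw [List.drop_length]
            intro hc
            exact absurd (conn_nil.1 hc) (by omega))
      rw [List.take_length] at h0
      rcases h0 with ⟨m, e, hq, hmax, hget, hres⟩ | ⟨hall, hres⟩
      · exact Or.inl ⟨m, e, hq, hmax, hget, hres⟩
      · refine Or.inr ⟨?_, hres⟩
        intro m
        by_cases hm : m < (PySem.List.sorted E (fun x => x.2.2) false).length
        · exact hall m hm
        · exact conn_ge_length (by omega)
    exact scanRes_unique hA hB
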